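-- pv_equiv track=rewrite | github.com/feirik/Writeups | guessing_game_4/solve.py | make_list_fourteen
-- ===== SOURCE A (Python) =====
-- def make_list_fourteen(false_count_list):
--     zero_false_list = []
--     one_false_list = []
--     two_false_list = []
--     three_false_list = []
--
--     iter = 0
--     for i in false_count_list:
--         if i == 0:
--             zero_false_list.append(iter)
--         if i == 1:
--             one_false_list.append(iter)
--         if i == 2:
--             two_false_list.append(iter)
--         if i == 3:
--             three_false_list.append(iter)
--         iter += 1
--
--     remove_zero = zero_false_list[:0]
--     remove_one = one_false_list[:4]
--     remove_two = two_false_list[:19]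
--     remove_three = three_false_list[:67]
--
--     test_list = remove_zero + remove_one + remove_two + remove_three
--
--     return test_list
-- ===== SOURCE B (Python) =====
-- def make_list_fourteen(false_count_list):
--     def first(v, c):
--         return [i for i, x in enumerate(false_count_list) if x == v][:c]
--     return first(1, 4) + first(2, 19) + first(3, 67)
-- ===== Notes on version B (the rewrite author's own statement) =====
-- stated objective: simpler
-- what changed: Replaces the single pass maintaining four index buckets (plus a hand-kept counter) and the four post-hoc slices by a small helper that scans once per target value collecting matching indices up to its cap, and drops the always-empty zero bucket (A slices it [:0]).
import Mathlib
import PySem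

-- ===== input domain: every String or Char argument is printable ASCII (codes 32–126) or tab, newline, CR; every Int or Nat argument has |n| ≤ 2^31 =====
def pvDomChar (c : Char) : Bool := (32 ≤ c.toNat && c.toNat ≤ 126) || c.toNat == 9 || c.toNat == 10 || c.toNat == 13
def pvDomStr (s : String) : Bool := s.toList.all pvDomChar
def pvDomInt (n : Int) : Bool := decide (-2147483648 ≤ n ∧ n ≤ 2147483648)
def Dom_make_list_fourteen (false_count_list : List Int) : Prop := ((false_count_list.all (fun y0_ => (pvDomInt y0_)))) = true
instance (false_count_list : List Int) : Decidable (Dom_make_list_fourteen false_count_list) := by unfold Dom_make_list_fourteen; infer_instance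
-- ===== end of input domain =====

-- B replaces A's single four-bucket pass (with a hand-kept counter and four slices)
-- by one helper scanning once per target value, capped; objective: simpler.

-- ===== PORT A =====
-- the fold state is ((zero, one, two, three), iter), exactly A's loop
def make_list_fourteen (false_count_list : List Int) : List Int :=
  let st := false_count_list.foldl
    (fun (s : (List Int × List Int × List Int × List Int) × Int) i =>
      let z := if i = 0 then s.1.1 ++ [s.2] else s.1.1
      let o := if i = 1 then s.1.2.1 ++ [s.2] else s.1.2.1
      let t := if i = 2 then s.1.2.2.1 ++ [s.2] else s.1.2.2.1
      let th := if i = 3 then s.1.2.2.2 ++ [s.2] else s.1.2.2.2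
      ((z, o, t, th), s.2 + 1))
    (([], [], [], []), 0)
  -- the slices [:0], [:4], [:19], [:67] with nonnegative bounds are List.take
  st.1.1.take 0 ++ st.1.2.1.take 4 ++ st.1.2.2.1.take 19 ++ st.1.2.2.2.take 67

-- ===== PORT B =====
-- [i for i, x in enumerate(lst) if x == v] starting the index at `it`
def pvCollect (v : Int) (it : Int) : List Int → List Int
  | [] => []
  | x :: xs => if x = v then it :: pvCollect v (it + 1) xs else pvCollect v (it + 1) xs

def pvFirst (v : Int) (c : Nat) (l : List Int) : List Int :=
  (pvCollect v 0 l).take c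

def make_list_fourteen_alt (false_count_list : List Int) : List Int :=
  pvFirst 1 4 false_count_list ++ pvFirst 2 19 false_count_list ++ pvFirst 3 67 false_count_list

-- ===== PRECONDITION & SPEC =====
def Spec_make_list_fourteen (false_count_list : List Int) (out : List Int) : Prop := out = make_list_fourteen_alt false_count_list
instance (false_count_list : List Int) (out : List Int) : Decidable (Spec_make_list_fourteen false_count_list out) := by unfold Spec_make_list_fourteen; infer_instance

-- ===== CLAIM (what is proved, stated in full; the proofs are below) =====
def Claim_equal_make_list_fourteen : Prop := ∀ (false_count_list : List Int), Dom_make_list_fourteen false_count_list → Spec_make_list_fourteen false_count_list (make_list_fourteen false_count_list)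

-- ===== LEMMAS AND PROOFS =====

-- characterisation of A's fold: each bucket accumulates pvCollect from the current counter
theorem pv_fold_char (l : List Int) (z o t th : List Int) (it : Int) :
    l.foldl
      (fun (s : (List Int × List Int × List Int × List Int) × Int) i =>
        let z := if i = 0 then s.1.1 ++ [s.2] else s.1.1
        let o := if i = 1 then s.1.2.1 ++ [s.2] else s.1.2.1
        let t := if i = 2 then s.1.2.2.1 ++ [s.2] else s.1.2.2.1
        let th := if i = 3 then s.1.2.2.2 ++ [s.2] else s.1.2.2.2
        ((z, o, t, th), s.2 + 1))
      ((z, o, t, th), it)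
    = ((z ++ pvCollect 0 it l, o ++ pvCollect 1 it l,
        t ++ pvCollect 2 it l, th ++ pvCollect 3 it l), it + l.length) := by
  induction l generalizing z o t th it with
  | nil => simp [pvCollect]
  | cons x xs ih =>
    simp only [List.foldl_cons, pvCollect]
    rw [ih]
    split_ifs <;> simp <;> omega

-- ===== VERDICT (by name: the statement is the Claim_ definition above) =====
theorem make_list_fourteen_spec : Claim_equal_make_list_fourteen := by
  intro l _
  show _ = _
  unfold make_list_fourteen make_list_fourteen_alt pvFirst
  rw [pv_fold_char]
  simp
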